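-- pv_equiv track=rewrite | github.com/longphan04/library_AI | ai_engine/src/data_processor.py | extract_best_identifier
-- ===== SOURCE A (Python) =====
-- def extract_best_identifier(identifiers):
--     """
--     Parse identifier với priority:
--     1. ISBN_13 (chuẩn quốc tế)
--     2. ISBN_10
--     3. OTHER types (parse PREFIX:NUMBER → lưu NUMBER, type=PREFIX)
--
--     Examples:
--       "OCLC:951285305" → identifier="951285305", type="OCLC"
--       "HARVARD:32044088773080" → identifier="32044088773080", type="HARVARD"
--       "978-0-13-468599-1" → identifier="978-0-13-468599-1", type="ISBN_13"
--     """
--     if not identifiers: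
--         return "", ""
--
--     # Priority 1: ISBN_13
--     for item in identifiers:
--         if item.get('type') == 'ISBN_13':
--             isbn = item.get('identifier', '')
--             return isbn, "ISBN_13"
--
--     # Priority 2: ISBN_10
--     for item in identifiers:
--         if item.get('type') == 'ISBN_10':
--             isbn = item.get('identifier', '')
--             return isbn, "ISBN_10"
--
--     # Priority 3: OTHER types - parse PREFIX:NUMBER format
--     for item in identifiers:
--         raw_id = item.get('identifier', '')
--
--         # Check if format is "PREFIX:NUMBER"
--         if ':' in raw_id:
--             parts = raw_id.split(':', 1)
--             prefix = parts[0].strip().upper()  # OCLC, HARVARD, etc.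
--             number = parts[1].strip()          # 951285305
--             return number, prefix
--
--     # Fallback: return first identifier as-is
--     # Fallback: return first identifier as-is
--     first_item = identifiers[0]
--     return first_item.get('identifier', ""), first_item.get('type', "UNKNOWN")
-- ===== SOURCE B (Python) =====
-- def extract_best_identifier(identifiers):
--     """Single pass: keep the first ISBN_13, first ISBN_10, first colon-parsed
--     candidate, then return by strict priority (simpler: one loop instead of three)."""
--     if not identifiers:
--         return "", ""
--     isbn13 = isbn10 = other = None
--     for item in identifiers:
--         t = item.get('type')
--         if isbn13 is None and t == 'ISBN_13':
--             isbn13 = item.get('identifier', '')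
--         if isbn10 is None and t == 'ISBN_10':
--             isbn10 = item.get('identifier', '')
--         if other is None:
--             raw = item.get('identifier', '')
--             if ':' in raw:
--                 pre, num = raw.split(':', 1)
--                 other = (num.strip(), pre.strip().upper())
--     if isbn13 is not None:
--         return isbn13, "ISBN_13"
--     if isbn10 is not None:
--         return isbn10, "ISBN_10"
--     if other is not None:
--         return other
--     first = identifiers[0]
--     return first.get('identifier', ''), first.get('type', 'UNKNOWN')
-- ===== Notes on version B (the rewrite author's own statement) =====
-- stated objective: simpler
-- what changed: Replaced A's three separate priority scans over the list by a single pass that maintains the first candidate of each kind and picks by priority afterwards.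
import Mathlib
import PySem

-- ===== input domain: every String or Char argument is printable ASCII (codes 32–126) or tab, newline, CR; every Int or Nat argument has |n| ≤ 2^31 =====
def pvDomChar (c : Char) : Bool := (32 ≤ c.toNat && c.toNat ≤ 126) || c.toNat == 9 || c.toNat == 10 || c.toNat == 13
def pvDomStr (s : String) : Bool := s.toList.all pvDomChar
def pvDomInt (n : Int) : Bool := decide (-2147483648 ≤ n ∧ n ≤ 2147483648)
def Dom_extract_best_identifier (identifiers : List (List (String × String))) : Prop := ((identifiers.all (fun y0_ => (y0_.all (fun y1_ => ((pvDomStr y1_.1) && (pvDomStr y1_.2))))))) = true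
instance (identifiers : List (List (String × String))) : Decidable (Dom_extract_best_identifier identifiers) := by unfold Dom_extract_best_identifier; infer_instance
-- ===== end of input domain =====

-- B is a single pass keeping the first candidate of each priority class, instead of A's three scans (objective: simpler).

-- shared dict-lookup helper: item.get(k, dflt) (first match, per the association-list convention)
def pvItemGetD (item : List (String × String)) (k dflt : String) : String :=
  (PySem.Dict.mk item).getD k dflt

-- parse "PREFIX:NUMBER" → (number.strip(), prefix.strip().upper()) via split(':', 1)
def pvColonParse (raw : String) : String × String :=
  let parts := (PySem.Str.splitMax? raw ":" 1).getD []
  (PySem.Str.strip ((PySem.List.pyGet? parts 1).getD ""),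
   PySem.Str.upper (PySem.Str.strip ((PySem.List.pyGet? parts 0).getD "")))

-- ===== PORT A =====
def pvAloop13 : List (List (String × String)) → Option String
  | [] => none
  | item :: rest =>
    if (PySem.Dict.mk item).get? "type" = some "ISBN_13" then
      some (pvItemGetD item "identifier" "")
    else pvAloop13 rest

def pvAloop10 : List (List (String × String)) → Option String
  | [] => none
  | item :: rest =>
    if (PySem.Dict.mk item).get? "type" = some "ISBN_10" then
      some (pvItemGetD item "identifier" "")
    else pvAloop10 rest

def pvAloopOther : List (List (String × String)) → Option (String × String)
  | [] => none
  | item :: rest =>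
    let raw := pvItemGetD item "identifier" ""
    if PySem.Str.isIn ":" raw then some (pvColonParse raw)
    else pvAloopOther rest

def extract_best_identifier (identifiers : List (List (String × String))) : String × String :=
  if identifiers = [] then ("", "")
  else
    match pvAloop13 identifiers with
    | some isbn => (isbn, "ISBN_13")
    | none =>
      match pvAloop10 identifiers with
      | some isbn => (isbn, "ISBN_10")
      | none =>
        match pvAloopOther identifiers with
        | some r => r
        | none =>
          let first := (PySem.List.pyGet? identifiers 0).getD []
          (pvItemGetD first "identifier" "", pvItemGetD first "type" "UNKNOWN")

-- ===== PORT B =====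
-- single-pass state: (first ISBN_13, first ISBN_10, first colon-parsed)
def pvBstep (st : Option String × Option String × Option (String × String))
    (item : List (String × String)) :
    Option String × Option String × Option (String × String) :=
  let t := (PySem.Dict.mk item).get? "type"
  let a := if st.1 = none ∧ t = some "ISBN_13" then some (pvItemGetD item "identifier" "") else st.1
  let b := if st.2.1 = none ∧ t = some "ISBN_10" then some (pvItemGetD item "identifier" "") else st.2.1
  let c :=
    if st.2.2 = none then
      let raw := pvItemGetD item "identifier" ""
      if PySem.Str.isIn ":" raw then some (pvColonParse raw) else none
    else st.2.2
  (a, b, c)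

def extract_best_identifier_alt (identifiers : List (List (String × String))) : String × String :=
  match identifiers with
  | [] => ("", "")
  | first :: _ =>
    let st := identifiers.foldl pvBstep (none, none, none)
    match st.1 with
    | some i => (i, "ISBN_13")
    | none =>
      match st.2.1 with
      | some i => (i, "ISBN_10")
      | none =>
        match st.2.2 with
        | some r => r
        | none => (pvItemGetD first "identifier" "", pvItemGetD first "type" "UNKNOWN")

-- ===== PRECONDITION & SPEC =====
def Spec_extract_best_identifier (identifiers : List (List (String × String))) (out : String × String) : Prop := out = extract_best_identifier_alt identifiers
instance (identifiers : List (List (String × String))) (out : String × String) : Decidable (Spec_extract_best_identifier identifiers out) := by unfold Spec_extract_best_identifier; infer_instance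

-- ===== CLAIM (what is proved, stated in full; the proofs are below) =====
def Claim_equal_extract_best_identifier : Prop := ∀ (identifiers : List (List (String × String))), Dom_extract_best_identifier identifiers → Spec_extract_best_identifier identifiers (extract_best_identifier identifiers)

-- ===== LEMMAS AND PROOFS =====

theorem pvFold_fst (ids : List (List (String × String)))
    (a : Option String) (b : Option String) (c : Option (String × String)) :
    (ids.foldl pvBstep (a, b, c)).1 = match a with | some x => some x | none => pvAloop13 ids := by
  induction ids generalizing a b c with
  | nil => cases a <;> rfl
  | cons item rest ih =>
    simp only [List.foldl_cons, ih, pvBstep, pvAloop13]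
    cases a <;> simp <;> split_ifs <;> simp_all

theorem pvFold_snd (ids : List (List (String × String)))
    (a : Option String) (b : Option String) (c : Option (String × String)) :
    (ids.foldl pvBstep (a, b, c)).2.1 = match b with | some x => some x | none => pvAloop10 ids := by
  induction ids generalizing a b c with
  | nil => cases b <;> rfl
  | cons item rest ih =>
    simp only [List.foldl_cons, ih, pvBstep, pvAloop10]
    cases b <;> simp <;> split_ifs <;> simp_all

theorem pvFold_thd (ids : List (List (String × String)))
    (a : Option String) (b : Option String) (c : Option (String × String)) :
    (ids.foldl pvBstep (a, b, c)).2.2 = match c with | some x => some x | none => pvAloopOther ids := by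
  induction ids generalizing a b c with
  | nil => cases c <;> rfl
  | cons item rest ih =>
    simp only [List.foldl_cons, ih, pvBstep, pvAloopOther]
    cases c <;> simp <;> split_ifs <;> simp_all

-- ===== VERDICT (by name: the statement is the Claim_ definition above) =====
theorem extract_best_identifier_spec : Claim_equal_extract_best_identifier := by
  intro ids _
  unfold Spec_extract_best_identifier extract_best_identifier extract_best_identifier_alt
  cases ids with
  | nil => rfl
  | cons first rest =>
    simp only [pvFold_fst, pvFold_snd, pvFold_thd, reduceCtorEq]
    simp [PySem.List.pyGet?, PySem.List.pyIdx?]
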